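-- pv_equiv track=rewrite | github.com/yguo0102/n2c2_2022_classification | n2c2_code/extract_data_fixed_len.py | adjust_prev_window
-- ===== SOURCE A (Python) =====
-- def adjust_prev_window(text, index, n_words):
--     if index == 0:
--         return 0
--
--     while n_words > 0 and index > 0:
--         index -= 1
--         if text[index] is ' ':
--             n_words -= 1
--
--     return index
-- ===== SOURCE B (Python) =====
-- def adjust_prev_window(text, index, n_words):
--     while n_words > 0 and index > 0:
--         pos = text.rfind(' ', 0, index)
--         if pos == -1:
--             return 0
--         index = pos
--         n_words -= 1
--     return index
-- ===== Notes on version B (the rewrite author's own statement) =====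
-- stated objective: faster
-- what changed: Replaced A's char-by-char backward scan (one Python-level iteration per character with a manual space test) by one str.rfind(' ', 0, index) jump per word, iterating once per word instead of once per character.
-- crash fix: When index > len(text) and n_words > 0 (and index > 0) A raises IndexError on text[index-1]; B's rfind clamps the search bound and returns the normal last-space result (0 at the witness). — e.g. on adjust_prev_window("ab", 5, 1): A raises IndexError, B returns 0
import Mathlib
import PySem

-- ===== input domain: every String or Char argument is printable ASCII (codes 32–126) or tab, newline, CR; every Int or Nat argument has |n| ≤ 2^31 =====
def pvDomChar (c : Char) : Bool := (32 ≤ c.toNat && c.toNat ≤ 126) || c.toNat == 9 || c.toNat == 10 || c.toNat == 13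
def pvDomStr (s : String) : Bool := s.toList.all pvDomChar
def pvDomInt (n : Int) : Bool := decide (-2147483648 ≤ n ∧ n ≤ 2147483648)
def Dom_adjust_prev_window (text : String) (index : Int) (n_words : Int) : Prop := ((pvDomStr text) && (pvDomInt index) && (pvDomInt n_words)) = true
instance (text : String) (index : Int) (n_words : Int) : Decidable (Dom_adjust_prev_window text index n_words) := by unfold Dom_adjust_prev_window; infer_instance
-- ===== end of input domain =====

-- B replaces A's char-by-char backward scan with one str.rfind jump per word (idiomatic;
-- equivalence of the RETURN value proved on Pre_, where A does not raise IndexError).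

-- ===== PORT A =====
-- the while loop of A: state (n_words, index); text[index] via pyGet? (none = IndexError, excluded by Pre_)
def pvLoopA (s : List Char) (n index : Int) : Int :=
  if 0 < n ∧ 0 < index then
    let index' := index - 1
    match PySem.List.pyGet? s index' with
    | some c => if c = ' ' then pvLoopA s (n - 1) index' else pvLoopA s n index'
    | none => index'   -- Python raises IndexError here; such inputs are outside Pre_
  else index
termination_by index.toNat
decreasing_by all_goals omega

def adjust_prev_window (text : String) (index : Int) (n_words : Int) : Int :=
  if index = 0 then 0 else pvLoopA text.toList n_words index

-- ===== PORT B =====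
-- the while loop of B: one text.rfind(' ', 0, index) per word
def pvLoopB (text : String) (index n : Int) : Int :=
  if 0 < n ∧ 0 < index then
    let pos := PySem.Str.rfindFrom text " " 0 (some index)
    if pos = -1 then 0 else pvLoopB text pos (n - 1)
  else index
termination_by n.toNat
decreasing_by omega

def adjust_prev_window_alt (text : String) (index : Int) (n_words : Int) : Int :=
  pvLoopB text index n_words

-- ===== PRECONDITION & SPEC =====
-- Pre_ excludes exactly the inputs where A raises IndexError: index > len(text) with the loop entered.
def Pre_adjust_prev_window (text : String) (index : Int) (n_words : Int) : Prop :=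
  index ≤ 0 ∨ n_words ≤ 0 ∨ index ≤ (text.length : Int)
instance (text : String) (index : Int) (n_words : Int) : Decidable (Pre_adjust_prev_window text index n_words) := by unfold Pre_adjust_prev_window; infer_instance
def pvWitness_adjust_prev_window : String × Int × Int := ("hello world foo", 12, 1)

-- A raises IndexError when index > len(text) and n_words > 0 (and index > 0); B returns the clamped-search result there.
def Raises_adjust_prev_window (text : String) (index : Int) (n_words : Int) : Prop :=
  (text.length : Int) < index ∧ 0 < n_words
instance (text : String) (index : Int) (n_words : Int) : Decidable (Raises_adjust_prev_window text index n_words) := by unfold Raises_adjust_prev_window; infer_instance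
def pvRaiseWitness_adjust_prev_window : String × Int × Int := ("ab", 5, 1)
def pvRaiseWitnessOut_adjust_prev_window : Int := 0

def Spec_adjust_prev_window (text : String) (index : Int) (n_words : Int) (out : Int) : Prop := out = adjust_prev_window_alt text index n_words
instance (text : String) (index : Int) (n_words : Int) (out : Int) : Decidable (Spec_adjust_prev_window text index n_words out) := by unfold Spec_adjust_prev_window; infer_instance

-- ===== CLAIM (what is proved, stated in full; the proofs are below) =====
def Claim_equal_adjust_prev_window : Prop := ∀ (text : String) (index : Int) (n_words : Int), Dom_adjust_prev_window text index n_words → Pre_adjust_prev_window text index n_words → Spec_adjust_prev_window text index n_words (adjust_prev_window text index n_words)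
def Claim_raises_adjust_prev_window : Prop := (∀ (text : String) (index : Int) (n_words : Int), Dom_adjust_prev_window text index n_words → Raises_adjust_prev_window text index n_words → ¬ Pre_adjust_prev_window text index n_words) ∧ (Dom_adjust_prev_window (pvRaiseWitness_adjust_prev_window.1) (pvRaiseWitness_adjust_prev_window.2.1) (pvRaiseWitness_adjust_prev_window.2.2) ∧ Raises_adjust_prev_window (pvRaiseWitness_adjust_prev_window.1) (pvRaiseWitness_adjust_prev_window.2.1) (pvRaiseWitness_adjust_prev_window.2.2) ∧ adjust_prev_window_alt (pvRaiseWitness_adjust_prev_window.1) (pvRaiseWitness_adjust_prev_window.2.1) (pvRaiseWitness_adjust_prev_window.2.2) = pvRaiseWitnessOut_adjust_prev_window)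

-- ===== LEMMAS AND PROOFS =====

-- position of the last ' ' strictly before m in s, -1 if none
def pvLastSpace (s : List Char) : Nat → Int
  | 0 => -1
  | m + 1 => if s[m]? = some ' ' then (m : Int) else pvLastSpace s m

lemma pvLastSpace_bounds (s : List Char) (m : Nat) :
    pvLastSpace s m = -1 ∨ (0 ≤ pvLastSpace s m ∧ pvLastSpace s m < m) := by
  induction m with
  | zero => left; rfl
  | succ m ih =>
    simp only [pvLastSpace]
    split
    · right; constructor <;> omega
    · rcases ih with h | h
      · left; exact h
      · right; constructor <;> omega

lemma pv_singleton_isPrefixOf (c : Char) (t : List Char) :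
    List.isPrefixOf [c] t = true ↔ t[0]? = some c := by
  cases t with
  | nil => simp [List.isPrefixOf]
  | cons a as =>
    simp [List.isPrefixOf]
    exact eq_comm

lemma pv_go_eq (s : List Char) (m : Nat) :
    ∀ j, j < m → PySem.Chars.rfind.go (s.take m) [' '] j = pvLastSpace s (j + 1) := by
  intro j
  induction j with
  | zero =>
    intro hj
    show (if List.isPrefixOf [' '] (s.take m) then (0 : Int) else -1) = _
    have h0 : (s.take m)[0]? = s[0]? := List.getElem?_take_of_lt hj
    by_cases h : s[0]? = some ' '
    · rw [if_pos (by rw [pv_singleton_isPrefixOf, h0]; exact h)]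
      simp [pvLastSpace, h]
    · rw [if_neg (by rw [pv_singleton_isPrefixOf, h0]; exact h)]
      simp [pvLastSpace, h]
  | succ j ih =>
    intro hj
    show (if List.isPrefixOf [' '] ((s.take m).drop (j + 1)) then ((j : Int) + 1) else
      PySem.Chars.rfind.go (s.take m) [' '] j) = _
    have hdrop : ((s.take m).drop (j + 1))[0]? = s[j + 1]? := by
      rw [List.getElem?_drop, List.getElem?_take_of_lt (by omega)]
    rw [show pvLastSpace (s) (j + 1 + 1) = (if s[j+1]? = some ' ' then ((j+1 : Nat) : Int) else pvLastSpace s (j + 1)) from rfl]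
    by_cases h : s[j+1]? = some ' '
    · rw [if_pos (by rw [pv_singleton_isPrefixOf, hdrop]; exact h), if_pos h]; push_cast; ring
    · rw [if_neg (by rw [pv_singleton_isPrefixOf, hdrop]; exact h), if_neg h]
      exact ih (by omega)

lemma pv_rfind_take (s : List Char) (m : Nat) (hm : m ≤ s.length) :
    PySem.Chars.rfind (s.take m) [' '] = pvLastSpace s m := by
  unfold PySem.Chars.rfind
  have hlen : (s.take m).length = m := List.length_take_of_le hm
  rw [hlen]
  cases m with
  | zero =>
    show (if List.isPrefixOf [' '] (s.take 0) then (0 : Int) else -1) = _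
    simp [pvLastSpace]
  | succ m =>
    show (if List.isPrefixOf [' '] ((s.take (m+1)).drop (m + 1)) then ((m : Int) + 1) else
      PySem.Chars.rfind.go (s.take (m+1)) [' '] m) = _
    rw [if_neg (by simp [List.drop_eq_nil_of_le, hlen])]
    exact pv_go_eq s (m+1) m (by omega)

lemma pv_rfindFrom_eq (text : String) (index : Int) (h0 : 0 < index)
    (hlen : index ≤ (text.toList.length : Int)) :
    PySem.Str.rfindFrom text " " 0 (some index) = pvLastSpace text.toList index.toNat := by
  have hb := pvLastSpace_bounds text.toList index.toNat
  have hr : PySem.Chars.rfind (List.drop (Int.toNat 0) (List.take index.toNat text.toList)) [' ']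
      = pvLastSpace text.toList index.toNat := by
    have h2 : Int.toNat 0 = 0 := rfl
    rw [h2, List.drop_zero]
    exact pv_rfind_take text.toList index.toNat (by omega)
  simp only [PySem.Str.rfindFrom, PySem.Chars.rfindFrom, show (" " : String).toList = [' '] from rfl]
  split_ifs with h1 h2 h3 h4 h5 <;> omega

-- A's loop characterised: from index = m it walks back to the last space (one n_words step) or to 0
lemma pvLoopA_char (s : List Char) (n : Int) (hn : 0 < n) (m : Nat) (hm : m ≤ s.length) :
    pvLoopA s n m = if pvLastSpace s m = -1 then 0 else pvLoopA s (n - 1) (pvLastSpace s m) := by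
  induction m with
  | zero =>
    rw [pvLoopA, if_neg (by omega)]
    simp [pvLastSpace]
  | succ m ih =>
    rw [pvLoopA, if_pos (by constructor <;> omega)]
    have hcast : ((m + 1 : Nat) : Int) - 1 = (m : Int) := by push_cast; ring
    have hget : PySem.List.pyGet? s ((m : Nat) : Int) = some s[m] := by
      rw [PySem.List.pyGet?_natCast]
      exact List.getElem?_eq_getElem (by omega)
    have hgm : s[m]? = some s[m] := List.getElem?_eq_getElem (by omega)
    have hls : pvLastSpace s (m + 1) = if s[m] = ' ' then (m : Int) else pvLastSpace s m := by
      simp only [pvLastSpace, hgm]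
      by_cases hc : s[m] = ' ' <;> simp [hc]
    simp only [hcast]
    rw [hget]
    show (if s[m] = ' ' then pvLoopA s (n - 1) (m : Int) else pvLoopA s n (m : Int)) = _
    rw [hls]
    by_cases hc : s[m] = ' '
    · simp only [if_pos hc]
      rw [if_neg (show ¬((m : Int) = -1) by omega)]
    · simp only [if_neg hc]
      exact ih (by omega)

-- the central bridge: A's loop equals B's loop on indices within the string
lemma pv_main (text : String) (k : Nat) :
    ∀ n : Int, n.toNat ≤ k → ∀ m : Nat, m ≤ text.toList.length →
      pvLoopA text.toList n m = pvLoopB text m n := by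
  induction k with
  | zero =>
    intro n hn m hm
    rw [pvLoopA, pvLoopB, if_neg (by omega), if_neg (by omega)]
  | succ k ih =>
    intro n hn m hm
    by_cases hpos : 0 < n
    · cases m with
      | zero =>
        rw [pvLoopA, pvLoopB, if_neg (by omega), if_neg (by omega)]
      | succ m =>
        have hfind : PySem.Str.rfindFrom text " " 0 (some ((m + 1 : Nat) : Int)) = pvLastSpace text.toList (m + 1) := by
          rw [pv_rfindFrom_eq text ((m + 1 : Nat) : Int) (by omega) (by exact_mod_cast hm), Int.toNat_natCast]
        have hB : pvLoopB text ((m + 1 : Nat) : Int) n =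
            (if pvLastSpace text.toList (m + 1) = -1 then 0
             else pvLoopB text (pvLastSpace text.toList (m + 1)) (n - 1)) := by
          rw [pvLoopB, if_pos (by constructor <;> omega)]
          simp only [hfind]
        rw [pvLoopA_char text.toList n hpos (m + 1) hm, hB]
        rcases pvLastSpace_bounds text.toList (m + 1) with h | h
        · simp only [if_pos h]
        · rw [if_neg (by omega), if_neg (by omega)]
          have hp : pvLastSpace text.toList (m + 1) = (((pvLastSpace text.toList (m + 1)).toNat : Nat) : Int) := by omega
          rw [hp]
          exact ih (n - 1) (by omega) _ (by omega)
    · rw [pvLoopA, pvLoopB, if_neg (by omega), if_neg (by omega)]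

-- ===== VERDICT (by name: the statement is the Claim_ definition above) =====
theorem adjust_prev_window_spec : Claim_equal_adjust_prev_window := by
  intro text index n_words _ hpre
  unfold Spec_adjust_prev_window adjust_prev_window adjust_prev_window_alt
  by_cases h0 : index = 0
  · rw [if_pos h0, h0, pvLoopB, if_neg (by omega)]
  · rw [if_neg h0]
    by_cases hneg : index < 0
    · rw [pvLoopA, pvLoopB, if_neg (by omega), if_neg (by omega)]
    · by_cases hn : n_words ≤ 0
      · rw [pvLoopA, pvLoopB, if_neg (by omega), if_neg (by omega)]
      · have hlen : index ≤ (text.length : Int) := by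
          rcases hpre with h | h | h
          · omega
          · omega
          · exact h
        have hm : index = ((index.toNat : Nat) : Int) := by omega
        rw [hm]
        exact pv_main text n_words.toNat n_words (le_refl _) index.toNat
          (by have : text.length = text.toList.length := rfl; omega)

theorem adjust_prev_window_raises : Claim_raises_adjust_prev_window := by
  unfold Claim_raises_adjust_prev_window
  constructor
  · intro text index n_words _ hr hp
    rcases hr with ⟨h1, h2⟩
    have : (0 : Int) ≤ (text.length : Int) := by positivity
    rcases hp with h | h | h <;> omega
  · refine ⟨by decide, by decide, ?_⟩
    show adjust_prev_window_alt "ab" 5 1 = 0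
    unfold adjust_prev_window_alt
    rw [pvLoopB, if_pos (by constructor <;> omega)]
    rw [show PySem.Str.rfindFrom "ab" " " 0 (some 5) = -1 from by decide]
    norm_num

-- self-check: at the raise witness, B's port indeed returns the stated value
theorem pvRaiseWitnessValue_ok : adjust_prev_window_alt "ab" 5 1 = 0 :=
  adjust_prev_window_raises.2.2.2
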